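-- pv_equiv track=rewrite | github.com/jmmaloney3/portopt | src/portopt/metrics.py | _requires_factor_tables
-- ===== SOURCE A (Python) =====
-- from typing import List, Dict, Optional, Union
--
-- def _requires_factor_tables(
--                            dimensions: List[str],
--                            filters: Optional[Dict[str, Union[str, List[str]]]] = None) -> tuple[bool, bool]:
--     """Determine if factor tables are required based on dimensions and filters.
--
--     This centralizes the logic for determining when to join factor_weights and factors tables.
--
--     Args:
--         dimensions: List of dimensions for the query
--         filters: Dictionary of filters to apply
--
--     Returns:
--         Tuple of (requires_factor_weights, requires_factor_levels)
--         - requires_factor_weights: True if factor_weights table is needed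
--         - requires_factor_levels: True if factors table is needed (for Level_* columns)
--     """
--     requires_factor_weights = False
--     requires_factor_levels = False
--
--     # Check dimensions
--     if dimensions:
--         requires_factor_weights = any(d.startswith('Level_') or d == 'Factor' for d in dimensions)
--         requires_factor_levels = any(d.startswith('Level_') for d in dimensions)
--
--     # Check filters if they exist
--     if filters:
--         requires_factor_weights = requires_factor_weights or \
--                                   any(d.startswith('Level_') or d == 'Factor' for d in filters.keys())
--         requires_factor_levels = requires_factor_levels or \
--                                  any(d.startswith('Level_') for d in filters.keys())
--
--     return requires_factor_weights, requires_factor_levels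
-- ===== SOURCE B (Python) =====
-- from typing import List, Dict, Optional, Union
--
-- def _requires_factor_tables(
--                            dimensions: List[str],
--                            filters: Optional[Dict[str, Union[str, List[str]]]] = None) -> tuple[bool, bool]:
--     """Single pass over dimensions + filter keys maintaining both flags."""
--     requires_factor_weights = False
--     requires_factor_levels = False
--     for key in list(dimensions or []) + list(filters or {}):
--         if key.startswith('Level_'):
--             return True, True
--         if key == 'Factor':
--             requires_factor_weights = True
--     return requires_factor_weights, requires_factor_levels
-- ===== Notes on version B (the rewrite author's own statement) =====
-- stated objective: simpler
-- what changed: Replaces the four separate any()-scans guarded by truthiness checks with one short-circuiting loop over the concatenation of dimensions and filter keys, maintaining the two flags together.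
import Mathlib
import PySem

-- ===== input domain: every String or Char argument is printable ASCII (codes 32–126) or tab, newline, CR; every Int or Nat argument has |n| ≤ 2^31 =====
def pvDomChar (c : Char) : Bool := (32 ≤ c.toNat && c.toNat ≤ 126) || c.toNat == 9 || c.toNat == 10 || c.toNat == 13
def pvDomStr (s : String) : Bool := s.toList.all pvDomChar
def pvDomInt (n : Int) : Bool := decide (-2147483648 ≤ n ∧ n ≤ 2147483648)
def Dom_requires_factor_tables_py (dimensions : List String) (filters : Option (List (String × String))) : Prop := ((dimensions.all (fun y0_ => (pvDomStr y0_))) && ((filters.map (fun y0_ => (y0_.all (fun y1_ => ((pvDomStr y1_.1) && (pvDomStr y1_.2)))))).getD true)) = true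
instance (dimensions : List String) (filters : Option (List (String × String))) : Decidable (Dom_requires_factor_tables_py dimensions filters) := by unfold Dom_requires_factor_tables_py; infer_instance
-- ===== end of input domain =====

-- B replaces A's four guarded any()-scans by one short-circuiting pass over dimensions ++ filter keys (objective: simpler).
-- ===== PORT A =====
-- Port of A: two guarded blocks of any()-scans, exactly as in the Python.
def requires_factor_tables_py (dimensions : List String) (filters : Option (List (String × String))) : Bool × Bool :=
  let rw : Bool := false
  let rl : Bool := false
  let rw := if dimensions ≠ [] then
      dimensions.any (fun d => PySem.Str.startswith d "Level_" || d == "Factor") else rw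
  let rl := if dimensions ≠ [] then
      dimensions.any (fun d => PySem.Str.startswith d "Level_") else rl
  match filters with
  | some f =>
    if f ≠ [] then
      (rw || f.any (fun kv => PySem.Str.startswith kv.1 "Level_" || kv.1 == "Factor"),
       rl || f.any (fun kv => PySem.Str.startswith kv.1 "Level_"))
    else (rw, rl)
  | none => (rw, rl)

-- ===== PORT B =====
-- Port of B: one short-circuiting loop over dimensions ++ filter keys.
def rftLoop : List String → Bool → Bool → Bool × Bool
  | [], w, l => (w, l)
  | k :: ks, w, l =>
    if PySem.Str.startswith k "Level_" then (true, true)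
    else if k == "Factor" then rftLoop ks true l
    else rftLoop ks w l

def requires_factor_tables_py_alt (dimensions : List String) (filters : Option (List (String × String))) : Bool × Bool :=
  rftLoop (dimensions ++ (filters.getD []).map Prod.fst) false false

-- ===== PRECONDITION & SPEC =====
def Spec_requires_factor_tables_py (dimensions : List String) (filters : Option (List (String × String))) (out : Bool × Bool) : Prop := out = requires_factor_tables_py_alt dimensions filters
instance (dimensions : List String) (filters : Option (List (String × String))) (out : Bool × Bool) : Decidable (Spec_requires_factor_tables_py dimensions filters out) := by unfold Spec_requires_factor_tables_py; infer_instance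

-- ===== CLAIM (what is proved, stated in full; the proofs are below) =====
def Claim_equal_requires_factor_tables_py : Prop := ∀ (dimensions : List String) (filters : Option (List (String × String))), Dom_requires_factor_tables_py dimensions filters → Spec_requires_factor_tables_py dimensions filters (requires_factor_tables_py dimensions filters)

-- ===== LEMMAS AND PROOFS =====

-- ===== VERDICT (by name: the statement is the Claim_ definition above) =====
theorem rftLoop_eq (ks : List String) : ∀ w l, rftLoop ks w l =
    (w || ks.any (fun k => PySem.Str.startswith k "Level_" || k == "Factor"),
     l || ks.any (fun k => PySem.Str.startswith k "Level_")) := by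
  induction ks with
  | nil => simp [rftLoop]
  | cons k ks ih =>
    intro w l
    simp only [rftLoop]
    split_ifs with h1 h2
    · simp at h1; simp [h1]
    · simp at h1; simp [ih, h1, h2]
    · simp at h1; simp [ih, h1, h2]

theorem requires_factor_tables_py_spec : Claim_equal_requires_factor_tables_py := by
  intro dims filters _
  unfold Spec_requires_factor_tables_py requires_factor_tables_py requires_factor_tables_py_alt
  rw [rftLoop_eq]
  cases filters with
  | none => cases dims <;> simp
  | some f =>
    cases f with
    | nil => cases dims <;> simp
    | cons kv fs => cases dims <;> simp [Function.comp_def, Bool.or_assoc]
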